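-- pv_equiv track=rewrite | github.com/keatonconrad/nfl-data-scraper | app.py | getWinStreak
-- ===== SOURCE A (Python) =====
-- def getWinStreak(index, team, year, seperate_team_stats):
--     streak = 0
--
--     if index == 0:
--         return 0
--
--     for game in seperate_team_stats[team][year][0:index]:
--         if streak >= 1:
--             if game['outcome'] == 1:
--                 streak += 1
--
--             elif game['outcome'] == 0:
--                 streak = -1
--
--         elif streak <= -1:
--             if game['outcome'] == 1:
--                 streak = 1
--
--             elif game['outcome'] == 0:
--                 streak -= 1
--
--         else:
--             if game['outcome'] == 1:
--                 streak = 1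
--
--             elif game['outcome'] == 0:
--                 streak = -1
--
--     # ties don't affect streak
--
--     return streak
-- ===== SOURCE B (Python) =====
-- def getWinStreak(index, team, year, seperate_team_stats):
--     if index == 0:
--         return 0
--     outcomes = [g['outcome'] for g in seperate_team_stats[team][year][0:index]]
--     # scan backwards: find the most recent decisive game (skipping ties),
--     # then count the consecutive run of that same outcome (ties skipped, early exit)
--     i = len(outcomes) - 1
--     while i >= 0 and outcomes[i] not in (0, 1):
--         i -= 1
--     if i < 0:
--         return 0
--     target = outcomes[i]
--     count = 1
--     i -= 1
--     while i >= 0: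
--         o = outcomes[i]
--         if o == target:
--             count += 1
--         elif o in (0, 1):
--             break
--         i -= 1
--     return count if target == 1 else -count
-- ===== Notes on version B (the rewrite author's own statement) =====
-- stated objective: simpler
-- what changed: A runs a three-branch sign state machine forward over all games of the slice; B scans the slice backward, finds the most recent decisive game (skipping ties) and counts its consecutive run with an early exit at the first opposite outcome.
import Mathlib
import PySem

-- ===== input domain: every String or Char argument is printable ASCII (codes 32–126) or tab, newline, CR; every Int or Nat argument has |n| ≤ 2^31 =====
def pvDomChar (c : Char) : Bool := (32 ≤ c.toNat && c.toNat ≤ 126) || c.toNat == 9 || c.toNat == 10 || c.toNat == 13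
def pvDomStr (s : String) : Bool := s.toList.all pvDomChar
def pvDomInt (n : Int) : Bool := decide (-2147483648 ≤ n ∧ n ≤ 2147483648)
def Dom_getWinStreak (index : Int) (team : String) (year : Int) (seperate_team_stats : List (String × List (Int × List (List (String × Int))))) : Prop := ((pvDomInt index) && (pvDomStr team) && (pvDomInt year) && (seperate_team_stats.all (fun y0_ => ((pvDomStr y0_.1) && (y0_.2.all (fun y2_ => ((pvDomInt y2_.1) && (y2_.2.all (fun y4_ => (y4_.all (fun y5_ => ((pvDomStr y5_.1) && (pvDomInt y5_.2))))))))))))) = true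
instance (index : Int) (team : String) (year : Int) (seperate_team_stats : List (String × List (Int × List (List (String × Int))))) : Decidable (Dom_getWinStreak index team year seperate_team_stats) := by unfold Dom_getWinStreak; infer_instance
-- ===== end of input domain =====

-- B replaces A's forward state-machine fold by a backward scan that finds the most
-- recent decisive game and counts its run (objective: simpler; same cost).

-- ===== PORT A =====
-- outcome of one game dict; missing key = KeyError in Python, excluded by Pre_
-- (default 2 is an arbitrary non-decisive value, never reached inside Pre_)
def pvOutcome (g : List (String × Int)) : Int := (List.lookup "outcome" g).getD 2

-- one iteration of A's loop body, branch for branch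
def pvStepO (streak o : Int) : Int :=
  if streak ≥ 1 then
    if o = 1 then streak + 1 else if o = 0 then -1 else streak
  else if streak ≤ -1 then
    if o = 1 then 1 else if o = 0 then streak - 1 else streak
  else
    if o = 1 then 1 else if o = 0 then -1 else streak

def getWinStreak (index : Int) (team : String) (year : Int) (seperate_team_stats : List (String × List (Int × List (List (String × Int))))) : Int :=
  if index = 0 then 0
  else
    let byYear := (List.lookup team seperate_team_stats).getD []
    let games := (List.lookup year byYear).getD []
    (PySem.List.slice games (some 0) (some index)).foldl (fun s g => pvStepO s (pvOutcome g)) 0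

-- ===== PORT B =====
-- count the consecutive run of outcome t (ties skipped), early exit at the opposite outcome
def pvCountRun (t : Int) : List Int → Int
  | [] => 0
  | o :: rest =>
      if o = t then 1 + pvCountRun t rest
      else if o = 1 ∨ o = 0 then 0
      else pvCountRun t rest

-- skip ties to the most recent decisive game, then signed run length
def pvFindRun : List Int → Int
  | [] => 0
  | o :: rest =>
      if o = 1 then 1 + pvCountRun 1 rest
      else if o = 0 then -(1 + pvCountRun 0 rest)
      else pvFindRun rest

def getWinStreak_alt (index : Int) (team : String) (year : Int) (seperate_team_stats : List (String × List (Int × List (List (String × Int))))) : Int :=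
  if index = 0 then 0
  else
    let byYear := (List.lookup team seperate_team_stats).getD []
    let games := (List.lookup year byYear).getD []
    let outcomes := (PySem.List.slice games (some 0) (some index)).map pvOutcome
    pvFindRun outcomes.reverse

-- ===== PRECONDITION & SPEC =====
-- Pre_ excludes exactly the KeyErrors: unless index == 0 (A returns before any lookup),
-- the team key, the year key and every game's 'outcome' key in the slice must exist.
def Pre_getWinStreak (index : Int) (team : String) (year : Int) (seperate_team_stats : List (String × List (Int × List (List (String × Int))))) : Prop :=
  index = 0 ∨
  ((List.lookup team seperate_team_stats).isSome = true ∧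
   (List.lookup year ((List.lookup team seperate_team_stats).getD [])).isSome = true ∧
   ∀ g ∈ PySem.List.slice ((List.lookup year ((List.lookup team seperate_team_stats).getD [])).getD []) (some 0) (some index),
     (List.lookup "outcome" g).isSome = true)
instance (index : Int) (team : String) (year : Int) (seperate_team_stats : List (String × List (Int × List (List (String × Int))))) : Decidable (Pre_getWinStreak index team year seperate_team_stats) := by unfold Pre_getWinStreak; infer_instance

def pvWitness_getWinStreak : Int × String × Int × (List (String × List (Int × List (List (String × Int))))) :=
  (2, "t", 0, [("t", [(0, [[("outcome", 1)], [("outcome", 1)], [("outcome", 0)]])])])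

def Spec_getWinStreak (index : Int) (team : String) (year : Int) (seperate_team_stats : List (String × List (Int × List (List (String × Int))))) (out : Int) : Prop := out = getWinStreak_alt index team year seperate_team_stats
instance (index : Int) (team : String) (year : Int) (seperate_team_stats : List (String × List (Int × List (List (String × Int))))) (out : Int) : Decidable (Spec_getWinStreak index team year seperate_team_stats out) := by unfold Spec_getWinStreak; infer_instance

-- ===== CLAIM (what is proved, stated in full; the proofs are below) =====
def Claim_equal_getWinStreak : Prop := ∀ (index : Int) (team : String) (year : Int) (seperate_team_stats : List (String × List (Int × List (List (String × Int))))), Dom_getWinStreak index team year seperate_team_stats → Pre_getWinStreak index team year seperate_team_stats → Spec_getWinStreak index team year seperate_team_stats (getWinStreak index team year seperate_team_stats)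

-- ===== LEMMAS AND PROOFS =====
lemma pvCountRun_nonneg (t : Int) (l : List Int) : 0 ≤ pvCountRun t l := by
  induction l with
  | nil => simp [pvCountRun]
  | cons o rest ih => simp only [pvCountRun]; split_ifs <;> omega

-- characterisation: each one-sided run count in terms of the signed result
lemma pvCountRun_char (l : List Int) :
    pvCountRun 1 l = (if 1 ≤ pvFindRun l then pvFindRun l else 0) ∧
    pvCountRun 0 l = (if pvFindRun l ≤ -1 then -(pvFindRun l) else 0) := by
  induction l with
  | nil => simp [pvCountRun, pvFindRun]
  | cons o rest ih =>
    obtain ⟨ih1, ih0⟩ := ih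
    have h1 := pvCountRun_nonneg 1 rest
    have h0 := pvCountRun_nonneg 0 rest
    by_cases ho1 : o = 1
    · subst ho1
      simp only [pvCountRun, pvFindRun]
      norm_num
      constructor <;> omega
    · by_cases ho0 : o = 0
      · subst ho0
        simp only [pvCountRun, pvFindRun]
        norm_num
        constructor <;> omega
      · simp only [pvCountRun, pvFindRun, if_neg ho1, if_neg ho0,
          if_neg (by tauto : ¬(o = 1 ∨ o = 0))]
        exact ⟨ih1, ih0⟩

-- one step of A's state machine = one more recent game in front of B's backward scan
lemma pvStep_findRun (x : Int) (r : List Int) :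
    pvStepO (pvFindRun r) x = pvFindRun (x :: r) := by
  obtain ⟨h1, h0⟩ := pvCountRun_char r
  by_cases hx1 : x = 1
  · subst hx1
    simp only [pvFindRun, pvStepO, h1]
    split_ifs <;> omega
  · by_cases hx0 : x = 0
    · subst hx0
      simp only [pvFindRun, pvStepO, if_neg (by norm_num : ¬(0:Int) = 1), h0]
      split_ifs <;> omega
    · simp only [pvFindRun, pvStepO, if_neg hx1, if_neg hx0]
      split_ifs <;> rfl

lemma pvFold_eq_findRun (l : List Int) : l.foldl pvStepO 0 = pvFindRun l.reverse := by
  induction l using List.reverseRecOn with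
  | nil => rfl
  | append_singleton l x ih =>
    rw [List.foldl_append, List.reverse_append]
    simp only [List.foldl_cons, List.foldl_nil, List.reverse_cons, List.reverse_nil,
      List.nil_append, List.singleton_append]
    rw [ih, pvStep_findRun]

-- ===== VERDICT (by name: the statement is the Claim_ definition above) =====
theorem getWinStreak_spec : Claim_equal_getWinStreak := by
  intro index team year sts _ _
  unfold Spec_getWinStreak getWinStreak getWinStreak_alt
  by_cases h : index = 0
  · simp [h]
  · simp only [if_neg h]
    rw [← List.foldl_map, pvFold_eq_findRun]
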